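-- pv_equiv track=rewrite | github.com/tezeladata/algorithmical | Second account/Codewars/6kyu.py | solve
-- ===== SOURCE A (Python) =====
-- def solve(s):
--     alphabet = "abcdefghijklmnopqrstuvwxyz"
--     s = s.replace("a", "_").replace("e", "_").replace("i", "_").replace("o", "_").replace("u", "_").split("_")
--     res = []
--
--     for word in s:
--         sum = 0
--         for i in word: sum += alphabet.index(i)+1
--         res.append([word, sum])
--     return sorted(res, key=lambda x: x[1], reverse=True)[0][1]
-- ===== SOURCE B (Python) =====
-- def solve(s):
--     # One linear scan: reset the running sum at vowels/underscores,
--     # otherwise add the letter value and keep the best sum seen so far.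
--     alphabet = "abcdefghijklmnopqrstuvwxyz"
--     best = 0
--     cur = 0
--     for c in s:
--         if c in "aeiou_":
--             cur = 0
--         else:
--             cur += alphabet.index(c) + 1
--             best = max(best, cur)
--     return best
-- ===== Notes on version B (the rewrite author's own statement) =====
-- stated objective: simpler
-- what changed: Replaces A's replace-five-vowels/split/per-word-sum/sort pipeline by a single linear scan that keeps a running segment sum and the best sum seen, resetting at vowels and underscores; no intermediate lists and no sort.
import Mathlib
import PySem

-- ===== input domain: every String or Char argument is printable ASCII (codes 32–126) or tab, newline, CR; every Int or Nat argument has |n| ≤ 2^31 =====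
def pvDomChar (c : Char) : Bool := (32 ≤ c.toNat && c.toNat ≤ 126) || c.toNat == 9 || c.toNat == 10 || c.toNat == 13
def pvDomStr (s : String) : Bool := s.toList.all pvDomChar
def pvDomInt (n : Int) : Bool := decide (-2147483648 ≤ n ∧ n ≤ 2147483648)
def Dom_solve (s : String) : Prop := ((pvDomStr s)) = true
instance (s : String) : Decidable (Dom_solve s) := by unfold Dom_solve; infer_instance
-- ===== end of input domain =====

-- B replaces A's replace/split/per-word-sum/sort pipeline by one linear scan keeping a running
-- segment sum and the best sum so far (objective: simpler).

-- ===== PORT A =====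
-- alphabet = "abcdefghijklmnopqrstuvwxyz"
def pvAlpha : String := "abcdefghijklmnopqrstuvwxyz"

def solve (s : String) : Int :=
  -- s = s.replace("a","_").replace("e","_").replace("i","_").replace("o","_").replace("u","_").split("_")
  let t := PySem.Str.replace (PySem.Str.replace (PySem.Str.replace (PySem.Str.replace
             (PySem.Str.replace s "a" "_") "e" "_") "i" "_") "o" "_") "u" "_"
  let words := (PySem.Str.split? t "_").getD []   -- separator "_" ≠ "", so split? is always `some`
  -- res = []; for word: sum = 0; for i in word: sum += alphabet.index(i)+1; res.append([word, sum])
  -- alphabet.index(i) raises ValueError for chars outside a–z: those inputs are excluded by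
  -- Pre_solve (Str.find returns -1 where Python raises)
  let res : List (String × Int) := words.foldl
    (fun res w =>
      res ++ [(w, w.toList.foldl (fun sum c => sum + (PySem.Str.find pvAlpha (String.ofList [c]) + 1)) 0)]) []
  -- return sorted(res, key=lambda x: x[1], reverse=True)[0][1]  (res is never empty, default unreachable)
  ((PySem.List.pyGet? (PySem.List.sorted res (fun x => x.2) true) 0).getD ("", 0)).2

-- ===== PORT B =====
def solve_alt (s : String) : Int :=
  -- best = cur = 0; for c in s: if c in "aeiou_": cur = 0 else: cur += alphabet.index(c)+1; best = max(best, cur)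
  -- ('c in "aeiou_"' for a single char = membership in its characters)
  (s.toList.foldl
    (fun (st : Int × Int) c =>
      if c ∈ (['a', 'e', 'i', 'o', 'u', '_'] : List Char) then (st.1, 0)
      else
        let cur := st.2 + (PySem.Str.find pvAlpha (String.ofList [c]) + 1)
        (max st.1 cur, cur))
    (0, 0)).1

-- ===== PRECONDITION & SPEC =====
-- Pre_: alphabet.index raises ValueError on any char that is not a lowercase letter or '_'
-- (vowels and '_' are removed before indexing); exactly those inputs are excluded.
def Pre_solve (s : String) : Prop :=
  s.toList.all (fun c => ("abcdefghijklmnopqrstuvwxyz_").toList.contains c) = true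
instance (s : String) : Decidable (Pre_solve s) := by unfold Pre_solve; infer_instance

def pvWitness_solve : String := "hello_world"

def Spec_solve (s : String) (out : Int) : Prop := out = solve_alt s
instance (s : String) (out : Int) : Decidable (Spec_solve s out) := by unfold Spec_solve; infer_instance

-- ===== CLAIM (what is proved, stated in full; the proofs are below) =====
def Claim_equal_solve : Prop := ∀ (s : String), Dom_solve s → Pre_solve s → Spec_solve s (solve s)

-- ===== LEMMAS AND PROOFS =====

-- the separator set: vowels and the underscore
def pvSepL : List Char := ['a', 'e', 'i', 'o', 'u', '_']
def pvAlphaL : List Char := "abcdefghijklmnopqrstuvwxyz".toList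

-- one single-char replacement as a function on chars, and the composite of the five
def pvRep (a : Char) (c : Char) : Char := if c = a then '_' else c
def pvSub (c : Char) : Char := pvRep 'u' (pvRep 'o' (pvRep 'i' (pvRep 'e' (pvRep 'a' c))))

-- split of a char list at the chars satisfying p: (first group, remaining groups)
def pvPsplit (p : Char → Prop) [DecidablePred p] : List Char → List Char × List (List Char)
  | [] => ([], [])
  | c :: t =>
    let r := pvPsplit p t
    if p c then ([], r.1 :: r.2) else (c :: r.1, r.2)

-- letter value and segment sum
def pvV (c : Char) : Int := PySem.Chars.find pvAlphaL [c] + 1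
def pvWsum (g : List Char) : Int := g.foldl (fun sum c => sum + pvV c) 0

-- running maximum of B's scan
def pvRunmax : List Char → Int → Int
  | [], cur => cur
  | c :: t, cur =>
    if c ∈ pvSepL then pvRunmax t 0
    else max (cur + pvV c) (pvRunmax t (cur + pvV c))

theorem pv_find_bridge (c : Char) :
    PySem.Str.find pvAlpha (String.ofList [c]) + 1 = pvV c := by
  simp [pvV, pvAlpha, pvAlphaL]

theorem pv_sub_eq_underscore (c : Char) : pvSub c = '_' ↔ c ∈ pvSepL := by
  unfold pvSub pvRep pvSepL
  split_ifs <;> simp_all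

theorem pv_sub_eq_self (c : Char) (h : c ∉ pvSepL) : pvSub c = c := by
  unfold pvSepL at h
  unfold pvSub pvRep
  split_ifs <;> simp_all

theorem pv_replace_go (a b : Char) :
    ∀ (fuel : Nat) (l acc : List Char), l.length ≤ fuel →
      PySem.Chars.replace.go [a] [b] fuel l acc
        = acc.reverse ++ l.map (fun c => if c = a then b else c) := by
  intro fuel
  induction fuel with
  | zero =>
    intro l acc h
    have hl : l = [] := List.eq_nil_of_length_eq_zero (Nat.le_zero.mp h)
    subst hl
    rw [PySem.Chars.replace.go.eq_def]; simp
  | succ n ih =>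
    intro l acc h
    cases l with
    | nil => rw [PySem.Chars.replace.go.eq_def]; simp
    | cons c t =>
      by_cases hc : a = c
      · subst hc
        have hstep : PySem.Chars.replace.go [a] [b] (n + 1) (a :: t) acc
            = PySem.Chars.replace.go [a] [b] n t (b :: acc) := by
          rw [PySem.Chars.replace.go.eq_def]; simp [List.isPrefixOf]
        rw [hstep, ih t (b :: acc) (by simpa using h)]
        simp
      · have hstep : PySem.Chars.replace.go [a] [b] (n + 1) (c :: t) acc
            = PySem.Chars.replace.go [a] [b] n t (c :: acc) := by
          rw [PySem.Chars.replace.go.eq_def]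
          simp [List.isPrefixOf, beq_eq_false_iff_ne.mpr hc]
        rw [hstep, ih t (c :: acc) (by simpa using h)]
        have : ¬ (c = a) := fun hh => hc hh.symm
        simp [this]

theorem pv_replace_single (a b : Char) (l : List Char) :
    PySem.Chars.replace l [a] [b] = l.map (fun c => if c = a then b else c) := by
  unfold PySem.Chars.replace
  simp only [List.isEmpty_cons]
  have := pv_replace_go a b l.length l []
  simpa using this (le_refl _)

theorem pv_splitOn_go (d : Char) :
    ∀ (fuel : Nat) (l cur : List Char) (acc : List (List Char)), l.length < fuel →
      PySem.Chars.splitOn.go [d] fuel l cur acc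
        = acc.reverse ++ (cur.reverse ++ (pvPsplit (· = d) l).1) :: (pvPsplit (· = d) l).2 := by
  intro fuel
  induction fuel with
  | zero => intro l cur acc h; omega
  | succ n ih =>
    intro l cur acc h
    cases l with
    | nil => rw [PySem.Chars.splitOn.go.eq_def]; simp [pvPsplit]
    | cons c t =>
      by_cases hc : d = c
      · subst hc
        have hstep : PySem.Chars.splitOn.go [d] (n + 1) (d :: t) cur acc
            = PySem.Chars.splitOn.go [d] n t [] (cur.reverse :: acc) := by
          rw [PySem.Chars.splitOn.go.eq_def]; simp [List.isPrefixOf]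
        rw [hstep, ih t [] (cur.reverse :: acc) (by simp at h ⊢; omega)]
        simp [pvPsplit]
      · have hstep : PySem.Chars.splitOn.go [d] (n + 1) (c :: t) cur acc
            = PySem.Chars.splitOn.go [d] n t (c :: cur) acc := by
          rw [PySem.Chars.splitOn.go.eq_def]
          simp [List.isPrefixOf, beq_eq_false_iff_ne.mpr hc]
        rw [hstep, ih t (c :: cur) acc (by simp at h ⊢; omega)]
        have hcd : ¬ (c = d) := fun hh => hc hh.symm
        simp [pvPsplit, hcd]

theorem pv_splitOn_single (d : Char) (l : List Char) :
    PySem.Chars.splitOn l [d] = (pvPsplit (· = d) l).1 :: (pvPsplit (· = d) l).2 := by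
  unfold PySem.Chars.splitOn
  rw [pv_splitOn_go d (l.length + 1) l [] [] (by omega)]
  simp

theorem pv_psplit_map (l : List Char) :
    pvPsplit (· = '_') (l.map pvSub) = pvPsplit (· ∈ pvSepL) l := by
  induction l with
  | nil => simp [pvPsplit]
  | cons c t ih =>
    by_cases hc : c ∈ pvSepL
    · have h1 : pvSub c = '_' := (pv_sub_eq_underscore c).mpr hc
      simp [pvPsplit, h1, hc, ih]
    · have h1 : pvSub c = c := pv_sub_eq_self c hc
      have h2 : ¬ (pvSub c = '_') := fun hh => hc ((pv_sub_eq_underscore c).mp hh)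
      simp only [List.map_cons, pvPsplit, h1]
      rw [if_neg (by simpa [h1] using h2), if_neg hc, ih]

theorem pv_mem_psplit (p : Char → Prop) [DecidablePred p] (l : List Char) :
    (∀ c ∈ (pvPsplit p l).1, c ∈ l ∧ ¬ p c) ∧
    (∀ g ∈ (pvPsplit p l).2, ∀ c ∈ g, c ∈ l ∧ ¬ p c) := by
  induction l with
  | nil => simp [pvPsplit]
  | cons c t ih =>
    obtain ⟨ih1, ih2⟩ := ih
    by_cases hc : p c
    · simp only [pvPsplit, if_pos hc]
      refine ⟨by simp, ?_⟩
      intro g hg c' hc'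
      rcases List.mem_cons.mp hg with h | h
      · subst h; exact ⟨List.mem_cons_of_mem _ (ih1 c' hc').1, (ih1 c' hc').2⟩
      · exact ⟨List.mem_cons_of_mem _ (ih2 g h c' hc').1, (ih2 g h c' hc').2⟩
    · simp only [pvPsplit, if_neg hc]
      refine ⟨?_, ?_⟩
      · intro c' hc'
        rcases List.mem_cons.mp hc' with h | h
        · subst h; exact ⟨List.mem_cons_self, hc⟩
        · exact ⟨List.mem_cons_of_mem _ (ih1 c' h).1, (ih1 c' h).2⟩
      · intro g hg c' hc'
        exact ⟨List.mem_cons_of_mem _ (ih2 g hg c' hc').1, (ih2 g hg c' hc').2⟩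

theorem pv_v_nonneg (c : Char) (h : c ∈ pvAlphaL) : 0 ≤ pvV c := by
  have hinf : [c] <:+: pvAlphaL := by
    obtain ⟨l₁, l₂, hl⟩ := List.append_of_mem h
    exact ⟨l₁, l₂, by simp [hl]⟩
  have := (PySem.Chars.find_nonneg_iff pvAlphaL [c]).mpr hinf
  unfold pvV; omega

theorem pv_wsum_init (g : List Char) :
    ∀ (a : Int), g.foldl (fun sum c => sum + pvV c) a = a + pvWsum g := by
  induction g with
  | nil => intro a; simp [pvWsum]
  | cons c t ih =>
    intro a
    simp only [pvWsum, List.foldl_cons]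
    rw [ih (a + pvV c), ih (0 + pvV c)]
    ring

theorem pv_wsum_nonneg (g : List Char) (h : ∀ c ∈ g, c ∈ pvAlphaL) : 0 ≤ pvWsum g := by
  induction g with
  | nil => simp [pvWsum]
  | cons c t ih =>
    have h1 : 0 ≤ pvV c := pv_v_nonneg c (h c List.mem_cons_self)
    have h2 : 0 ≤ pvWsum t := ih (fun c' hc' => h c' (List.mem_cons_of_mem _ hc'))
    have : pvWsum (c :: t) = (0 + pvV c) + pvWsum t := by
      simp only [pvWsum, List.foldl_cons]
      rw [pv_wsum_init t (0 + pvV c)]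
      simp [pvWsum]
    omega

theorem pv_foldl_max_mem (L : List Int) : ∀ (a : Int),
    List.foldl max a L = a ∨ List.foldl max a L ∈ L := by
  induction L with
  | nil => intro a; simp
  | cons x t ih =>
    intro a
    simp only [List.foldl_cons]
    rcases ih (max a x) with h | h
    · rcases max_choice a x with hm | hm
      · rw [h, hm]; exact Or.inl rfl
      · rw [h, hm]; exact Or.inr List.mem_cons_self
    · exact Or.inr (List.mem_cons_of_mem _ h)

theorem pv_max_eq (L : List Int) (a m : Int) (hm : m ∈ a :: L)
    (hge : ∀ x ∈ a :: L, x ≤ m) : m = List.foldl max a L := by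
  apply le_antisymm
  · obtain ⟨h1, h2⟩ := PySem.List.le_foldl_max L a
    rcases List.mem_cons.mp hm with h | h
    · exact h ▸ h1
    · exact h2 m h
  · rcases pv_foldl_max_mem L a with h | h
    · rw [h]; exact hge a List.mem_cons_self
    · exact hge _ (List.mem_cons_of_mem _ h)

theorem pv_foldl_max_max (L : List Int) : ∀ (x y : Int),
    List.foldl max (max x y) L = max x (List.foldl max y L) := by
  induction L with
  | nil => intro x y; rfl
  | cons z t ih =>
    intro x y
    simp only [List.foldl_cons, max_assoc]
    exact ih x (max y z)

theorem pv_pyGet?_zero {α : Type} (x : α) (l : List α) :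
    PySem.List.pyGet? (x :: l) 0 = some x := by
  simp [PySem.List.pyGet?, PySem.List.pyIdx?]

theorem pv_loop (cs : List Char) :
    ∀ (b cur : Int), 0 ≤ b → cur ≤ b →
      (cs.foldl
        (fun (st : Int × Int) c =>
          if c ∈ (['a', 'e', 'i', 'o', 'u', '_'] : List Char) then (st.1, 0)
          else
            let cur := st.2 + (PySem.Str.find pvAlpha (String.ofList [c]) + 1)
            (max st.1 cur, cur))
        (b, cur)).1 = max b (pvRunmax cs cur) := by
  induction cs with
  | nil => intro b cur _ hcb; simp [pvRunmax, max_eq_left hcb]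
  | cons c t ih =>
    intro b cur hb hcb
    by_cases hc : c ∈ pvSepL
    · have hc' : c ∈ (['a', 'e', 'i', 'o', 'u', '_'] : List Char) := hc
      simp only [List.foldl_cons, if_pos hc']
      rw [ih b 0 hb hb]
      simp [pvRunmax, hc]
    · have hc' : c ∉ (['a', 'e', 'i', 'o', 'u', '_'] : List Char) := hc
      simp only [List.foldl_cons, if_neg hc', pv_find_bridge]
      simp only [pv_find_bridge] at ih
      rw [ih (max b (cur + pvV c)) (cur + pvV c) (le_trans hb (le_max_left _ _)) (le_max_right _ _)]
      simp [pvRunmax, hc, max_assoc]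

theorem pv_runmax_eq (cs : List Char) :
    ∀ (cur b : Int), (∀ c ∈ cs, c ∉ pvSepL → c ∈ pvAlphaL) → cur ≤ b → 0 ≤ b →
      max b (pvRunmax cs cur)
        = max b (List.foldl max (cur + pvWsum (pvPsplit (· ∈ pvSepL) cs).1)
            (((pvPsplit (· ∈ pvSepL) cs).2).map pvWsum)) := by
  induction cs with
  | nil => intro cur b _ _ _; simp [pvRunmax, pvPsplit, pvWsum]
  | cons c t ih =>
    intro cur b hmem hcb hb
    by_cases hc : c ∈ pvSepL
    · simp only [pvRunmax, pvPsplit, if_pos hc]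
      rw [ih 0 b (fun c' h' => hmem c' (List.mem_cons_of_mem _ h')) hb hb]
      have hz : pvWsum ([] : List Char) = 0 := by simp [pvWsum]
      simp only [hz, List.map_cons, List.foldl_cons, add_zero, zero_add]
      rw [pv_foldl_max_max]
      rw [← max_assoc, max_eq_left hcb]
    · have hmem' : ∀ c' ∈ t, c' ∉ pvSepL → c' ∈ pvAlphaL :=
        fun c' h' => hmem c' (List.mem_cons_of_mem _ h')
      have hw1 : 0 ≤ pvWsum (pvPsplit (· ∈ pvSepL) t).1 := by
        apply pv_wsum_nonneg
        intro c' hc'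
        obtain ⟨h1, h2⟩ := (pv_mem_psplit (· ∈ pvSepL) t).1 c' hc'
        exact hmem' c' h1 h2
      simp only [pvRunmax, pvPsplit, if_neg hc]
      rw [← max_assoc]
      rw [ih (cur + pvV c) (max b (cur + pvV c))
        hmem' (le_max_right _ _) (le_trans hb (le_max_left _ _))]
      have hws : pvWsum (c :: (pvPsplit (· ∈ pvSepL) t).1)
          = pvV c + pvWsum (pvPsplit (· ∈ pvSepL) t).1 := by
        simp only [pvWsum, List.foldl_cons]
        rw [pv_wsum_init _ (0 + pvV c)]
        simp [pvWsum]
      rw [hws, max_assoc]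
      congr 1
      have hle : cur + pvV c ≤ List.foldl max
          (cur + pvV c + pvWsum (pvPsplit (· ∈ pvSepL) t).1)
          (((pvPsplit (· ∈ pvSepL) t).2).map pvWsum) := by
        have := (PySem.List.le_foldl_max
          (((pvPsplit (· ∈ pvSepL) t).2).map pvWsum)
          (cur + pvV c + pvWsum (pvPsplit (· ∈ pvSepL) t).1)).1
        omega
      rw [max_eq_right hle]
      congr 1
      ring

-- ===== VERDICT (by name: the statement is the Claim_ definition above) =====
set_option maxHeartbeats 1000000 in
theorem solve_spec : Claim_equal_solve := by
  intro s _ hpre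
  unfold Spec_solve
  set cs := s.toList with hcs
  set P := pvPsplit (· ∈ pvSepL) cs with hP
  -- Pre_ in list form
  have hpre' : ∀ c ∈ cs, c ∉ pvSepL → c ∈ pvAlphaL := by
    intro c hcmem hns
    unfold Pre_solve at hpre
    rw [List.all_eq_true] at hpre
    have : c ∈ ("abcdefghijklmnopqrstuvwxyz_").toList := by simpa using hpre c hcmem
    rw [show ("abcdefghijklmnopqrstuvwxyz_").toList = pvAlphaL ++ ['_'] from rfl] at this
    rcases List.mem_append.mp this with h | h
    · exact h
    · exfalso; apply hns; simp at h; simp [pvSepL, h]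
  have hw1 : 0 ≤ pvWsum P.1 := by
    apply pv_wsum_nonneg
    intro c' hc'
    obtain ⟨h1, h2⟩ := (pv_mem_psplit (· ∈ pvSepL) cs).1 c' hc'
    exact hpre' c' h1 h2
  -- B side
  have hB : solve_alt s = max 0 (List.foldl max (pvWsum P.1) (P.2.map pvWsum)) := by
    unfold solve_alt
    rw [← hcs, pv_loop cs 0 0 (le_refl 0) (le_refl 0),
      pv_runmax_eq cs 0 0 hpre' (le_refl 0) (le_refl 0)]
    rw [zero_add]
  -- A side
  unfold solve
  dsimp only
  -- the replaced string
  have ht : (PySem.Str.replace (PySem.Str.replace (PySem.Str.replace (PySem.Str.replace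
      (PySem.Str.replace s "a" "_") "e" "_") "i" "_") "o" "_") "u" "_").toList
      = cs.map pvSub := by
    simp only [PySem.Str.toList_replace]
    rw [show ("a" : String).toList = ['a'] from rfl, show ("e" : String).toList = ['e'] from rfl,
      show ("i" : String).toList = ['i'] from rfl, show ("o" : String).toList = ['o'] from rfl,
      show ("u" : String).toList = ['u'] from rfl, show ("_" : String).toList = ['_'] from rfl]
    rw [pv_replace_single, pv_replace_single, pv_replace_single, pv_replace_single,
      pv_replace_single]
    simp only [List.map_map, ← hcs]
    exact List.map_congr_left (fun c _ => rfl)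
  -- the split
  obtain ⟨ws, hws, hwl⟩ :
      ∃ ws, PySem.Str.split? (PySem.Str.replace (PySem.Str.replace (PySem.Str.replace
        (PySem.Str.replace (PySem.Str.replace s "a" "_") "e" "_") "i" "_") "o" "_") "u" "_") "_"
        = some ws ∧ ws.map String.toList = P.1 :: P.2 := by
    have h1 := PySem.Str.split?_map (PySem.Str.replace (PySem.Str.replace (PySem.Str.replace
      (PySem.Str.replace (PySem.Str.replace s "a" "_") "e" "_") "i" "_") "o" "_") "u" "_") "_"
    rw [ht, show ("_" : String).toList = ['_'] from rfl] at h1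
    rw [show PySem.Chars.split? (cs.map pvSub) ['_']
        = some (PySem.Chars.splitOn (cs.map pvSub) ['_']) from rfl] at h1
    rw [pv_splitOn_single, pv_psplit_map, ← hP] at h1
    cases hsp : PySem.Str.split? (PySem.Str.replace (PySem.Str.replace (PySem.Str.replace
      (PySem.Str.replace (PySem.Str.replace s "a" "_") "e" "_") "i" "_") "o" "_") "u" "_") "_" with
    | none => rw [hsp] at h1; simp at h1
    | some ws =>
      rw [hsp] at h1
      exact ⟨ws, rfl, by simpa using h1⟩
  rw [hws]
  simp only [Option.getD_some]
  -- res as a map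
  have hfun : (fun (sum : Int) (c : Char) =>
      sum + (PySem.Str.find pvAlpha (String.ofList [c]) + 1)) = fun sum c => sum + pvV c := by
    funext sum c
    rw [← pv_find_bridge c]
  rw [PySem.List.foldl_append_singleton_eq_map
    (fun w => (w, w.toList.foldl (fun sum c => sum + (PySem.Str.find pvAlpha (String.ofList [c]) + 1)) 0)) ws []]
  simp only [List.nil_append, hfun]
  set res : List (String × Int) := ws.map (fun w => (w, w.toList.foldl (fun sum c => sum + pvV c) 0)) with hres
  have hkeys : res.map (fun x => x.2) = pvWsum P.1 :: P.2.map pvWsum := by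
    rw [hres, List.map_map]
    have : ((fun (x : String × Int) => x.2) ∘ fun w =>
        (w, w.toList.foldl (fun sum c => sum + pvV c) 0))
        = (fun w : String => pvWsum w.toList) := by
      funext w; simp [pvWsum]
    rw [this, show (fun w : String => pvWsum w.toList) = pvWsum ∘ String.toList from rfl,
      ← List.map_map, hwl]
    simp
  -- res is nonempty
  have hres_ne : res ≠ [] := by
    intro h
    have := congrArg (List.map (fun x => x.2)) h
    rw [hkeys] at this; simp at this
  -- the sorted head
  cases hsort : PySem.List.sorted res (fun x => x.2) true with
  | nil => exact absurd ((PySem.List.sorted_eq_nil_iff res (fun x => x.2) true).mp hsort) hres_ne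
  | cons m mt =>
    rw [pv_pyGet?_zero]
    simp only [Option.getD_some]
    -- m.2 is the maximum of the keys
    have hmmem : m ∈ res := by
      have hperm := PySem.List.sorted_perm res (fun x => x.2) true
      rw [hsort] at hperm
      exact hperm.mem_iff.mp List.mem_cons_self
    have hkey : m.2 ∈ pvWsum P.1 :: P.2.map pvWsum := by
      rw [← hkeys]; exact List.mem_map_of_mem hmmem
    have hge : ∀ x ∈ pvWsum P.1 :: P.2.map pvWsum, x ≤ m.2 := by
      intro x hx
      rw [← hkeys] at hx
      obtain ⟨y, hy, hxy⟩ := List.mem_map.mp hx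
      exact hxy ▸ PySem.List.key_head_sorted_rev_ge res (fun x => x.2) hsort y hy
    have hmax := pv_max_eq (P.2.map pvWsum) (pvWsum P.1) m.2 hkey hge
    rw [hB, hmax]
    have h0 : 0 ≤ List.foldl max (pvWsum P.1) (P.2.map pvWsum) :=
      le_trans hw1 (PySem.List.le_foldl_max (P.2.map pvWsum) (pvWsum P.1)).1
    rw [max_eq_right h0]
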